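-- pv_equiv track=rewrite | github.com/foxadb/google-foobar | expanding_nebula/solution.py | count_antecedents
-- ===== SOURCE A (Python) =====
-- def count_antecedents(image_ints, all_images):
--     """
--     Iterate through the array of images and find the antecedents for each one.
--     We store the counter of paths to reach each antecedent in a dictionary.
--     Note that we only need the counter to answer the problem, so it is useless
--     to store the antecedent values and it helps in terms of space complexity
--     """
--     antecedents_count = {i: 1 for i in range(len(all_images))}
--     for current_image in image_ints:
--         next_antecedents_count = {i: 0 for i in range(len(all_images))}
--         for current_antecedent in antecedents_count:
--             for next_antecedent, computed_image in enumerate(all_images[current_antecedent]):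
--                 if (computed_image == current_image):
--                     next_antecedents_count[next_antecedent] += antecedents_count[current_antecedent]
--         antecedents_count = next_antecedents_count
--     return sum(antecedents_count.values())
-- ===== SOURCE B (Python) =====
-- def count_antecedents(image_ints, all_images):
--     """Precompute value -> list of (source, target) transitions once, then per
--     image column touch only the matching transitions (vector of counts)."""
--     n = len(all_images)
--     trans = {}
--     for a, row in enumerate(all_images):
--         for b, val in enumerate(row):
--             trans.setdefault(val, []).append((a, b))
--     counts = [1] * n
--     for v in image_ints:
--         new = [0] * n
--         for a, b in trans.get(v, []):
--             new[b] += counts[a]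
--         counts = new
--     return sum(counts)
-- ===== Notes on version B (the rewrite author's own statement) =====
-- stated objective: alternative
-- what changed: B precomputes once a dict mapping each image value to its list of matching (antecedent, successor) transitions and per column folds only over those matches into a plain count vector, instead of A rescanning every antecedent's full successor row for every column; on dense-match inputs the cost is similar (measured ~1.4x), the win appears only when matches are sparse.
import Mathlib
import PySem

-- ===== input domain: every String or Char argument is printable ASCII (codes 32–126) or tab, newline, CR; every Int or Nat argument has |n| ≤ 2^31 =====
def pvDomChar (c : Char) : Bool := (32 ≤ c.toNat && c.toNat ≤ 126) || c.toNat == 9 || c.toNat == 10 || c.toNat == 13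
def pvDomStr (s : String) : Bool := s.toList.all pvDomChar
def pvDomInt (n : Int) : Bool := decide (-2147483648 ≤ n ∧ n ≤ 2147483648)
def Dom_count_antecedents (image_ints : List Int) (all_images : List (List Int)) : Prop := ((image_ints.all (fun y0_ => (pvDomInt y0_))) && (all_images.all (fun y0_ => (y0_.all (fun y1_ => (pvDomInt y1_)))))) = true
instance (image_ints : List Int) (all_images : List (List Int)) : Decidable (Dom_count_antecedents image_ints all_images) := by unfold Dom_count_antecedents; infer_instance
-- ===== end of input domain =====

-- B replaces A's per-column scan of every (antecedent, successor) pair by a precomputed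
-- map image-value -> matching transitions, touching only matching pairs per column (alternative algorithm).


-- ===== PORT A =====
-- Literal port of A. Python raises KeyError on `next_antecedents_count[next_antecedent]` when a
-- matching successor index reaches len(all_images); Pre_ excludes exactly those inputs, and inside
-- Pre_ every dict/list access below hits an existing key/in-range index, so pyGetD/getD/modify are exact.
def count_antecedents (image_ints : List Int) (all_images : List (List Int)) : Int :=
  -- antecedents_count = {i: 1 for i in range(len(all_images))}
  let antecedents_count : PySem.Dict Int Int :=
    (PySem.List.pyRange 0 (PySem.List.len all_images) 1).foldl
      (fun d i => d.insert i 1) PySem.Dict.empty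
  let final : PySem.Dict Int Int :=
    image_ints.foldl (fun antecedents_count current_image =>
      -- next_antecedents_count = {i: 0 for i in range(len(all_images))}
      let next0 : PySem.Dict Int Int :=
        (PySem.List.pyRange 0 (PySem.List.len all_images) 1).foldl
          (fun d i => d.insert i 0) PySem.Dict.empty
      -- for current_antecedent in antecedents_count: for next_antecedent, computed_image in enumerate(...):
      antecedents_count.keys.foldl (fun nx current_antecedent =>
        (PySem.List.enumerate (PySem.List.pyGetD all_images current_antecedent [])).foldl
          (fun nx2 p =>
            if p.2 == current_image then
              nx2.modify p.1 0 (fun c => c + antecedents_count.getD current_antecedent 0)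
            else nx2) nx) next0) antecedents_count
  final.values.sum

-- ===== PORT B =====
-- Literal port of Source B (enumerate -> zipIdx; trans.setdefault(val, []).append((a, b)) -> modify val [] (· ++ [(a, b)]);
-- new[b] += counts[a] -> List.set/getD, exact inside Pre_ where every touched b is < len(all_images)).
def count_antecedents_alt (image_ints : List Int) (all_images : List (List Int)) : Int :=
  let n := all_images.length
  let trans : PySem.Dict Int (List (Nat × Nat)) :=
    all_images.zipIdx.foldl (fun t r =>
      r.1.zipIdx.foldl (fun t2 q =>
        t2.modify q.1 [] (fun L => L ++ [(r.2, q.2)])) t) PySem.Dict.empty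
  let counts : List Int := List.replicate n 1
  let final : List Int :=
    image_ints.foldl (fun counts v =>
      (trans.getD v []).foldl (fun nx ab =>
        nx.set ab.2 (nx.getD ab.2 0 + counts.getD ab.1 0)) (List.replicate n 0)) counts
  final.sum

-- ===== PRECONDITION & SPEC =====
-- Pre_ excludes exactly the inputs where A raises KeyError (and Source B IndexError): some image value
-- occurring at a position ≥ len(all_images) inside some row. A returns on every input admitted here.
def Pre_count_antecedents (image_ints : List Int) (all_images : List (List Int)) : Prop :=
  ∀ row ∈ all_images, ∀ x ∈ row.drop all_images.length, x ∉ image_ints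
instance (image_ints : List Int) (all_images : List (List Int)) : Decidable (Pre_count_antecedents image_ints all_images) := by unfold Pre_count_antecedents; infer_instance

def pvWitness_count_antecedents : List Int × List (List Int) := ([1, 2], [[1, 2], [2, 1]])

def Spec_count_antecedents (image_ints : List Int) (all_images : List (List Int)) (out : Int) : Prop := out = count_antecedents_alt image_ints all_images
instance (image_ints : List Int) (all_images : List (List Int)) (out : Int) : Decidable (Spec_count_antecedents image_ints all_images out) := by unfold Spec_count_antecedents; infer_instance

-- ===== CLAIM (what is proved, stated in full; the proofs are below) =====
def Claim_equal_count_antecedents : Prop := ∀ (image_ints : List Int) (all_images : List (List Int)), Dom_count_antecedents image_ints all_images → Pre_count_antecedents image_ints all_images → Spec_count_antecedents image_ints all_images (count_antecedents image_ints all_images)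

-- ===== LEMMAS AND PROOFS =====

-- The invariant linking A's counter dict (keys 0..n-1 in order) to B's counter list.
def pvQ (n : Nat) (d : PySem.Dict Int Int) (l : List Int) : Prop :=
  d.keys = (List.range n).map (fun (i : Nat) => (i : Int)) ∧ l.length = n ∧
    ∀ i < n, d.getD (i : Int) 0 = l.getD i 0

-- PySem.List.enumerate is Lean's zipIdx with the components swapped and cast.
theorem pv_enum {α : Type} (xs : List α) : ∀ (s : Int),
    PySem.List.enumerate xs s = xs.zipIdx.map (fun q => (s + (q.2 : Int), q.1)) := by
  induction xs with
  | nil => intro s; simp [PySem.List.enumerate]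
  | cons x t ih =>
    intro s
    simp only [PySem.List.enumerate, List.zipIdx_cons, List.map_cons]
    rw [ih (s+1), List.zipIdx_succ, List.map_map]
    simp only [List.cons.injEq]
    refine ⟨by ring_nf, List.map_congr_left ?_⟩
    rintro ⟨a, i⟩ hq
    simp [Function.comp]; ring

-- a fold over zipIdx is a fold over the index range with getD lookups
theorem pv_zipIdx_foldl {α δ : Type} (xs : List α) (dflt : α) (g : δ → α → Nat → δ) :
    ∀ (s : Nat) (init : δ),
    (xs.zipIdx s).foldl (fun acc r => g acc r.1 r.2) init
      = (List.range xs.length).foldl (fun acc a => g acc (xs.getD a dflt) (s + a)) init := by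
  induction xs with
  | nil => intro s init; simp
  | cons x t ih =>
    intro s init
    simp only [List.zipIdx_cons, List.foldl_cons, List.length_cons, List.range_succ_eq_map,
      List.foldl_map]
    rw [ih (s+1) (g init x s)]
    have h0 : (g init x (s + 0)) = g init x s := by simp
    rw [show (x :: t).getD 0 dflt = x from rfl, h0]
    apply PySem.List.foldl_congr_mem
    intro acc a _
    have h1 : (x :: t).getD (a.succ) dflt = t.getD a dflt := rfl
    rw [h1]
    have h2 : s + 1 + a = s + a.succ := by omega
    rw [h2]

-- a range-dict built from inserts satisfies pvQ with a constant list
theorem pv_init (n : Nat) (c : Int) :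
    pvQ n ((PySem.List.pyRange 0 (n : Int) 1).foldl (fun d i => d.insert i c) PySem.Dict.empty)
      (List.replicate n c) := by
  have hfresh : ∀ a ∈ PySem.List.pyRange 0 (n:Int) 1, (PySem.Dict.empty : PySem.Dict Int Int).contains a = false := by
    intro a _; simp [PySem.Dict.contains_empty]
  have hnd : ((PySem.List.pyRange 0 (n:Int) 1).map (fun i => i)).Nodup := by
    simpa using PySem.List.nodup_pyRange_one 0 (n:Int)
  have hitems' : ((PySem.List.pyRange 0 (n:Int) 1).foldl (fun d i => d.insert i c) PySem.Dict.empty).items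
      = (PySem.List.pyRange 0 (n:Int) 1).map (fun a => (a, c)) := by
    simpa using PySem.Dict.items_foldl_insert_fresh (PySem.List.pyRange 0 (n:Int) 1)
      (fun i => i) (fun _ => c) PySem.Dict.empty hfresh hnd
  have hkeys : ((PySem.List.pyRange 0 (n:Int) 1).foldl (fun d i => d.insert i c) PySem.Dict.empty).keys
      = (List.range n).map (fun (i : Nat) => (i : Int)) := by
    have h0 : ((PySem.List.pyRange 0 (n:Int) 1).foldl (fun d i => d.insert i c) PySem.Dict.empty).keys
        = ((PySem.List.pyRange 0 (n:Int) 1).map (fun a => (a, c))).map Prod.fst := by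
      rw [← hitems']; rfl
    rw [h0, List.map_map]
    have h1 : (Prod.fst ∘ fun a : Int => (a, c)) = id := rfl
    rw [h1, List.map_id, PySem.List.pyRange_zero_nat]
  refine ⟨hkeys, by simp, ?_⟩
  intro i hi
  have hmem : ((i:Int), c) ∈ ((PySem.List.pyRange 0 (n:Int) 1).foldl (fun d i => d.insert i c) PySem.Dict.empty).items := by
    rw [hitems']
    exact List.mem_map.2 ⟨(i:Int), by rw [PySem.List.mem_pyRange_one]; omega, rfl⟩
  have hnd2 : ((PySem.List.pyRange 0 (n:Int) 1).foldl (fun d i => d.insert i c) PySem.Dict.empty).keys.Nodup := by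
    apply PySem.Dict.nodup_keys_foldl_insert
    simp [PySem.Dict.keys_empty]
  rw [PySem.Dict.getD_of_mem_items _ hmem hnd2 0, List.getD_eq_getElem?_getD]
  simp [hi]

-- the flattened (value, (source, target)) triple list B's table groups by value
def pvFlat (all_images : List (List Int)) : List (Int × Nat × Nat) :=
  all_images.zipIdx.flatMap (fun r => r.1.zipIdx.map (fun q => (q.1, (r.2, q.2))))

-- B's transition-table lookup, characterised over the flattened triple list
theorem pv_trans_getD (all_images : List (List Int)) (v : Int) :
    (all_images.zipIdx.foldl (fun t r =>
      r.1.zipIdx.foldl (fun t2 q =>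
        t2.modify q.1 [] (fun L => L ++ [(r.2, q.2)])) t) PySem.Dict.empty).getD v []
    = ((pvFlat all_images).filter (fun p => p.1 == v)).map (fun p => p.2) := by
  have h1 : all_images.zipIdx.foldl (fun t r =>
      r.1.zipIdx.foldl (fun t2 q =>
        t2.modify q.1 [] (fun L => L ++ [(r.2, q.2)])) t) PySem.Dict.empty
      = all_images.zipIdx.foldl (fun t r =>
        (r.1.zipIdx.map (fun q => (q.1, (r.2, q.2)))).foldl
          (fun t2 p => t2.modify p.1 [] (fun L => L ++ [p.2])) t) PySem.Dict.empty := by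
    apply PySem.List.foldl_congr_mem
    intro acc r _
    rw [List.foldl_map]
  rw [h1, ← List.foldl_flatMap]
  rw [PySem.Dict.getD_foldl_modify_append]
  simp [PySem.Dict.getD_empty, pvFlat]

-- membership in pvFlat pins the value to an actual matrix entry
theorem pv_mem_flat (all_images : List (List Int)) (p : Int × Nat × Nat)
    (hp : p ∈ pvFlat all_images) :
    p.2.1 < all_images.length ∧ ∃ row ∈ all_images, row[p.2.2]? = some p.1 ∧ p.2.2 < row.length := by
  obtain ⟨r, hr, hq⟩ := List.mem_flatMap.1 hp
  obtain ⟨q, hqm, rfl⟩ := List.mem_map.1 hq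
  obtain ⟨-, hi, hidx⟩ := List.mem_zipIdx hr
  obtain ⟨-, hi2, hidx2⟩ := List.mem_zipIdx hqm
  simp only [Nat.zero_add, Nat.sub_zero] at hi hidx hi2 hidx2
  refine ⟨hi, r.1, ?_, ?_, hi2⟩
  · rw [hidx]; exact List.getElem_mem hi
  · rw [List.getElem?_eq_getElem hi2, ← hidx2]

-- A's column pass equals the fold over the matching transitions of pvFlat
theorem pv_column (all_images : List (List Int)) (v : Int) (d : PySem.Dict Int Int)
    (hk : d.keys = (List.range all_images.length).map (fun (i : Nat) => (i : Int)))
    (next0 : PySem.Dict Int Int) :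
    d.keys.foldl (fun nx a =>
        (PySem.List.enumerate (PySem.List.pyGetD all_images a [])).foldl
          (fun nx2 p => if p.2 == v then nx2.modify p.1 0 (fun c => c + d.getD a 0) else nx2) nx)
      next0
    = (((pvFlat all_images).filter (fun p => p.1 == v)).map (fun p => p.2)).foldl
        (fun nx ab => nx.modify ((ab.2 : Nat) : Int) 0 (fun c => c + d.getD ((ab.1 : Nat) : Int) 0)) next0 := by
  have hU : ((pvFlat all_images).filter (fun p => p.1 == v)).map (fun p => p.2)
      = all_images.zipIdx.flatMap (fun r =>
          (r.1.zipIdx.filter (fun q => q.1 == v)).map (fun q => (r.2, q.2))) := by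
    simp only [pvFlat, List.filter_flatMap, List.map_flatMap]
    apply List.flatMap_congr
    intro r _
    rw [List.filter_map, List.map_map]
    rfl
  rw [hU, List.foldl_flatMap]
  rw [pv_zipIdx_foldl all_images []
    (fun acc row a => (List.map (fun q => (a, q.2)) (List.filter (fun q => q.1 == v) row.zipIdx)).foldl
      (fun nx ab => nx.modify ((ab.2 : Nat) : Int) 0 (fun c => c + d.getD ((ab.1 : Nat) : Int) 0)) acc) 0 next0]
  rw [hk, List.foldl_map]
  apply PySem.List.foldl_congr_mem
  intro acc a _
  simp only [Nat.zero_add]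
  rw [PySem.List.pyGetD_natCast, pv_enum _ 0, List.foldl_map, List.foldl_map,
    ← PySem.List.foldl_if_eq_foldl_filter (fun q : Int × Nat => q.1 == v)]
  apply PySem.List.foldl_congr_mem
  intro acc2 q _
  simp

-- the paired column update: dict modifies and list sets stay in sync
theorem pv_step (n : Nat) (U : List (Nat × Nat)) (cA cB : Nat → Int)
    (hc : ∀ a < n, cA a = cB a)
    (hU : ∀ ab ∈ U, ab.1 < n ∧ ab.2 < n)
    (d : PySem.Dict Int Int) (l : List Int) (h : pvQ n d l) :
    pvQ n (U.foldl (fun nx ab => nx.modify ((ab.2 : Nat) : Int) 0 (fun c => c + cA ab.1)) d)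
      (U.foldl (fun nx ab => nx.set ab.2 (nx.getD ab.2 0 + cB ab.1)) l) := by
  induction U generalizing d l with
  | nil => exact h
  | cons ab U ih =>
    obtain ⟨hk, hl, hg⟩ := h
    obtain ⟨ha, hb⟩ := hU ab (List.mem_cons_self)
    simp only [List.foldl_cons]
    apply ih (fun p hp => hU p (List.mem_cons_of_mem _ hp))
    refine ⟨?_, by simp [hl], ?_⟩
    · rw [PySem.Dict.keys_modify, PySem.Dict.keys_insert_of_contains]
      · exact hk
      · rw [PySem.Dict.contains_iff_mem_keys, hk]
        exact List.mem_map.2 ⟨ab.2, List.mem_range.2 hb, rfl⟩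
    · intro i hi
      rw [PySem.Dict.getD_modify]
      rw [List.getD_eq_getElem?_getD, List.getElem?_set]
      by_cases hib : i = ab.2
      · subst hib
        have hlen : ab.2 < l.length := by omega
        simp [hg ab.2 hi, hc ab.1 ha, hlen, List.getD_eq_getElem?_getD]
      · have h2 : ¬ ((i:Int) = ((ab.2:Nat) : Int)) := by exact_mod_cast hib
        have h3 : ¬ (ab.2 = i) := fun e => hib e.symm
        simp [h2, h3, hg i hi, List.getD_eq_getElem?_getD]

theorem pv_sum (n : Nat) (d : PySem.Dict Int Int) (l : List Int) (h : pvQ n d l) :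
    d.values.sum = l.sum := by
  obtain ⟨hk, hl, hg⟩ := h
  have hnd : d.keys.Nodup := by
    rw [hk]
    exact (List.nodup_range).map (fun a b => by exact_mod_cast id)
  have hv : d.values = d.items.map Prod.snd := rfl
  rw [hv, PySem.Dict.items_eq_map_keys d hnd 0, List.map_map, hk, List.map_map]
  have hll : l = (List.range n).map (fun i => l.getD i 0) := by
    apply List.ext_getElem (by simpa using hl)
    intro i h1 h2
    simp [List.getD_eq_getElem?_getD, List.getElem?_eq_getElem h1]
  conv_rhs => rw [hll]
  congr 1
  apply List.map_congr_left
  intro i hi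
  exact hg i (List.mem_range.1 hi)

-- the outer loop over the image columns preserves pvQ
theorem pv_loop (image_ints : List Int) (all_images : List (List Int))
    (hpre : Pre_count_antecedents image_ints all_images) :
    ∀ (d : PySem.Dict Int Int) (l : List Int), pvQ all_images.length d l →
    pvQ all_images.length
      (image_ints.foldl (fun antecedents_count current_image =>
        antecedents_count.keys.foldl (fun nx current_antecedent =>
          (PySem.List.enumerate (PySem.List.pyGetD all_images current_antecedent [])).foldl
            (fun nx2 p =>
              if p.2 == current_image then
                nx2.modify p.1 0 (fun c => c + antecedents_count.getD current_antecedent 0)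
              else nx2) nx)
          ((PySem.List.pyRange 0 (PySem.List.len all_images) 1).foldl
            (fun d i => d.insert i 0) PySem.Dict.empty)) d)
      (image_ints.foldl (fun counts v =>
        (((pvFlat all_images).filter (fun p => p.1 == v)).map (fun p => p.2)).foldl
          (fun nx ab => nx.set ab.2 (nx.getD ab.2 0 + counts.getD ab.1 0))
          (List.replicate all_images.length 0)) l) := by
  induction image_ints with
  | nil => intro d l h; exact h
  | cons v rest ih =>
    intro d l h
    simp only [List.foldl_cons]
    have hpre' : Pre_count_antecedents rest all_images := by
      intro row hrow x hx hmem
      exact hpre row hrow x hx (List.mem_cons_of_mem _ hmem)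
    apply ih hpre'
    rw [pv_column all_images v d h.1]
    apply pv_step all_images.length _ _ _ (fun a _ => h.2.2 a ‹_›)
    · -- bounds on the matching transitions, from Pre_
      intro ab hab
      obtain ⟨p, hpf, rfl⟩ := List.mem_map.1 hab
      have hpm := List.mem_filter.1 hpf
      obtain ⟨h1, row, hrow, hget, hlen⟩ := pv_mem_flat all_images p hpm.1
      refine ⟨h1, ?_⟩
      by_contra hge
      have hvv : p.1 = v := by simpa using hpm.2
      apply hpre row hrow p.1 _ (by rw [hvv]; exact List.mem_cons_self)
      have hmemdrop : p.1 ∈ row.drop all_images.length := by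
        have hgv : row[p.2.2]'hlen = p.1 := by
          have h4 := hget; rwa [List.getElem?_eq_getElem hlen, Option.some_inj] at h4
        rw [← hgv]
        apply (List.mem_iff_getElem).2
        refine ⟨p.2.2 - all_images.length, by simp; omega, ?_⟩
        rw [List.getElem_drop]
        congr 1
        omega
      exact hmemdrop
    · -- pvQ for the fresh zero accumulators
      have := pv_init all_images.length 0
      simpa [PySem.List.len_eq] using this

-- ===== VERDICT (by name: the statement is the Claim_ definition above) =====
theorem count_antecedents_spec : Claim_equal_count_antecedents := by
  intro image_ints all_images _ hpre
  show _ = _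
  simp only [count_antecedents, count_antecedents_alt]
  have hinit : pvQ all_images.length
      ((PySem.List.pyRange 0 (PySem.List.len all_images) 1).foldl
        (fun d i => d.insert i 1) PySem.Dict.empty)
      (List.replicate all_images.length 1) := by
    simpa [PySem.List.len_eq] using pv_init all_images.length 1
  have hfin := pv_loop image_ints all_images hpre _ _ hinit
  rw [pv_sum all_images.length _ _ hfin]
  congr 1
  apply PySem.List.foldl_congr_mem
  intro acc v _
  rw [pv_trans_getD]
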